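-- pv_equiv track=rewrite | github.com/timfornell/CodingTests | CodingTest-SimpleAlgorithms/Task1.py | solution
-- ===== SOURCE A (Python) =====
-- def solution(A: list):
--     num_even_pairs = [0] * len(A)
--
--     for i in range(0, len(A)):
--         # Rearrange A into [A[i:N], A[0, i - 1]]
--         new_a = A[i:] + A[0:i]
--
--         k = 0
--         while k < len(new_a) - 1:
--             sum_of_pair = (new_a[k] + new_a[k + 1])
--             if (sum_of_pair % 2) == 0:
--                 # Even pair found
--                 num_even_pairs[i] += 1
--
--                 # Set k to i + 2 since neither the number at i nor i + 1 can't be paired to another number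
--                 k += 2
--             else:
--                 k += 1
--
--     return max(num_even_pairs)
-- ===== SOURCE B (Python) =====
-- def solution(A: list):
--     # One pass: maximal same-parity runs; merge the circular wrap-around run;
--     # each run of length L yields L // 2 greedy even-sum pairs, and the best
--     # rotation cuts at a run boundary, so the answer is the sum over circular runs.
--     runs = []
--     for a in A:
--         p = a % 2
--         if runs and runs[-1][0] == p:
--             runs[-1][1] += 1
--         else:
--             runs.append([p, 1])
--     if len(runs) > 1 and runs[0][0] == runs[-1][0]:
--         runs[0][1] += runs.pop()[1]
--     return sum(L // 2 for _, L in runs)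
-- ===== Notes on version B (the rewrite author's own statement) =====
-- stated objective: faster
-- what changed: B replaces A's scan of every rotation (greedy pair count per rotation) by a single pass that builds the maximal same-parity runs, merges the circular wrap-around run, and returns the sum of L//2 over runs, which equals the best rotation's greedy count.
-- outside the precondition, e.g. on solution([]): A raises ValueError, B returns 0
import Mathlib
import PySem

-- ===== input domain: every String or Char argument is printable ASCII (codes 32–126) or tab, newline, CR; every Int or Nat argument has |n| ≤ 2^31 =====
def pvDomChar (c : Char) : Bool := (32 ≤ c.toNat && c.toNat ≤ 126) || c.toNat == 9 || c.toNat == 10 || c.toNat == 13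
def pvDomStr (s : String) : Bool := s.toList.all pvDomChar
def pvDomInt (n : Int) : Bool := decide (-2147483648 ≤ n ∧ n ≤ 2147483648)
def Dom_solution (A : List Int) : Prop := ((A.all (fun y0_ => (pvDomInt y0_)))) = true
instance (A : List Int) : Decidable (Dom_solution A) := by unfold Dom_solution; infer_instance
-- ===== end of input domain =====

-- B replaces A's quadratic scan of all rotations by a single pass over the circular
-- parity runs (each run of length L contributes L // 2), an asymptotic speed-up.

-- ===== PORT A =====
-- the inner while-loop of A: greedy scan of new_a from index k, counting even-sum pairs
def pvGreedyA (xs : List Int) (k : Nat) : Int :=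
  if _h : k + 1 < xs.length then
    match PySem.List.pyGet? xs (k : Int), PySem.List.pyGet? xs ((k : Int) + 1) with
    | some a, some b =>
        if PySem.Int.mod (a + b) 2 = 0 then 1 + pvGreedyA xs (k + 2)
        else pvGreedyA xs (k + 1)
    | _, _ => 0
  else 0
termination_by xs.length - k

def solution (A : List Int) : Int :=
  let counts := (PySem.List.pyRange 0 (A.length : Int) 1).map (fun i =>
    pvGreedyA (PySem.List.slice A (some i) none ++ PySem.List.slice A (some 0) (some i)) 0)
  (PySem.List.max? counts (fun x => x)).getD 0    -- max([]) raises in Python: Pre_ excludes A = []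

-- ===== PORT B =====
-- one step of B's run-building loop (runs[-1][0] == a % 2 extends the last run)
def pvStepB (runs : List (Int × Int)) (a : Int) : List (Int × Int) :=
  let p := PySem.Int.mod a 2
  match runs.getLast? with
  | some (q, L) => if q = p then runs.dropLast ++ [(q, L + 1)] else runs ++ [(p, 1)]
  | none => [(p, 1)]

-- B's run-building loop over A
def pvRunsB (A : List Int) : List (Int × Int) := A.foldl pvStepB []

-- B's wrap-around merge: if len(runs) > 1 and runs[0][0] == runs[-1][0]
def pvMergeB (runs : List (Int × Int)) : List (Int × Int) :=
  if 1 < runs.length ∧ (runs.headD (0, 0)).1 = (runs.getLastD (0, 0)).1 then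
    match runs with
    | r1 :: rest => (r1.1, r1.2 + (rest.getLastD (0, 0)).2) :: rest.dropLast
    | [] => []
  else runs

def solution_alt (A : List Int) : Int :=
  (pvMergeB (pvRunsB A)).foldl (fun s r => s + PySem.Int.floordiv r.2 2) 0

-- ===== PRECONDITION & SPEC =====
-- Pre_ excludes only the empty list, on which A's max([]) raises ValueError.
def Pre_solution (A : List Int) : Prop := A ≠ []
instance (A : List Int) : Decidable (Pre_solution A) := by unfold Pre_solution; infer_instance
def pvWitness_solution : List Int := [1, 2, 3]

def Spec_solution (A : List Int) (out : Int) : Prop := out = solution_alt A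
instance (A : List Int) (out : Int) : Decidable (Spec_solution A out) := by unfold Spec_solution; infer_instance

-- ===== CLAIM (what is proved, stated in full; the proofs are below) =====
def Claim_equal_solution : Prop := ∀ (A : List Int), Dom_solution A → Pre_solution A → Spec_solution A (solution A)

-- ===== LEMMAS AND PROOFS =====

-- parity of an integer, as Python computes it
def pvPar (a : Int) : Int := PySem.Int.mod a 2

-- greedy pair count, abstracted from A's while loop (on the raw integers)
def pvGI : List Int → Nat
  | [] => 0
  | [_] => 0
  | a :: b :: t => if PySem.Int.mod (a + b) 2 = 0 then 1 + pvGI t else pvGI (b :: t)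

-- greedy pair count on a parity list
def pvG : List Int → Nat
  | [] => 0
  | [_] => 0
  | a :: b :: t => if a = b then 1 + pvG t else pvG (b :: t)

-- maximal-run decomposition of a parity list (cons-directed)
def pvRuns : List Int → List (Int × Nat)
  | [] => []
  | a :: t =>
    match pvRuns t with
    | (b, L) :: r => if a = b then (a, L + 1) :: r else (a, 1) :: (b, L) :: r
    | [] => [(a, 1)]

-- one cons step / one snoc step on a run list
def pvConsR (a : Int) (r : List (Int × Nat)) : List (Int × Nat) :=
  match r with
  | (b, L) :: r' => if a = b then (a, L + 1) :: r' else (a, 1) :: (b, L) :: r'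
  | [] => [(a, 1)]

def pvSnocR (r : List (Int × Nat)) (a : Int) : List (Int × Nat) :=
  match r.getLast? with
  | some (q, L) => if q = a then r.dropLast ++ [(q, L + 1)] else r ++ [(a, 1)]
  | none => [(a, 1)]

def pvSum (r : List (Int × Nat)) : Nat := (r.map (fun x => x.2 / 2)).sum

-- sum after merging the wrap-around run (what B computes)
def pvSC' (r : List (Int × Nat)) : Nat :=
  if 1 < r.length ∧ (r.headD (0, 0)).1 = (r.getLastD (0, 0)).1 then
    match r with
    | r1 :: rest => pvSum ((r1.1, r1.2 + (rest.getLastD (0, 0)).2) :: rest.dropLast)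
    | [] => 0
  else pvSum r

def pvSC (p : List Int) : Nat := pvSC' (pvRuns p)

theorem pvPar_iff (a b : Int) : PySem.Int.mod (a + b) 2 = 0 ↔ pvPar a = pvPar b := by
  unfold pvPar
  rw [PySem.Int.mod_eq_emod_of_pos (by norm_num), PySem.Int.mod_eq_emod_of_pos (by norm_num),
      PySem.Int.mod_eq_emod_of_pos (by norm_num)]
  omega

theorem pvGI_eq_pvG (xs : List Int) : pvGI xs = pvG (xs.map pvPar) := by
  fun_induction pvGI xs with
  | case1 => simp [pvG]
  | case2 a => simp [pvG]
  | case3 a b t h ih => simp only [List.map_cons, pvGI, pvG, if_pos h, if_pos ((pvPar_iff a b).mp h), ih]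
  | case4 a b t h ih =>
      simp only [List.map_cons, pvGI, pvG, if_neg h, if_neg (fun hc => h ((pvPar_iff a b).mpr hc))]
      simpa using ih

theorem pvDrop_two (xs : List Int) (k : Nat) (h : k + 1 < xs.length) :
    xs.drop k = xs[k] :: xs[k + 1] :: xs.drop (k + 2) := by
  rw [List.drop_eq_getElem_cons (by omega), List.drop_eq_getElem_cons (by omega)]

theorem pvGreedyA_eq (xs : List Int) (k : Nat) : pvGreedyA xs k = (pvGI (xs.drop k) : Int) := by
  fun_induction pvGreedyA xs k with
  | case1 k h a b ha hb heq ih =>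
      rw [show ((k : Int) + 1) = ((k + 1 : Nat) : Int) by push_cast; ring] at ha
      rw [PySem.List.pyGet?_natCast] at ha hb
      rw [pvDrop_two xs k h]
      simp only [List.getElem?_eq_getElem (show k < xs.length by omega)] at hb
      simp only [List.getElem?_eq_getElem (show k + 1 < xs.length by omega)] at ha
      rw [Option.some_inj] at ha hb
      rw [hb, ha]
      simp only [pvGI, if_pos heq, ih]
      push_cast
      ring
  | case2 k h a b ha hb heq ih =>
      rw [show ((k : Int) + 1) = ((k + 1 : Nat) : Int) by push_cast; ring] at ha
      rw [PySem.List.pyGet?_natCast] at ha hb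
      rw [pvDrop_two xs k h]
      simp only [List.getElem?_eq_getElem (show k < xs.length by omega)] at hb
      simp only [List.getElem?_eq_getElem (show k + 1 < xs.length by omega)] at ha
      rw [Option.some_inj] at ha hb
      rw [hb, ha]
      rw [List.drop_eq_getElem_cons (show k + 1 < xs.length by omega)] at ih
      simp only [pvGI, if_neg heq, ih, show k + 1 + 1 = k + 2 by omega]
      rw [ha]
  | case3 k h hx =>
      exfalso
      refine hx (xs[k]'(by omega)) (xs[k + 1]'(by omega)) ?_ ?_
      · rw [PySem.List.pyGet?_natCast, List.getElem?_eq_getElem (show k < xs.length by omega)]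
      · rw [show ((k : Int) + 1) = ((k + 1 : Nat) : Int) by push_cast; ring,
            PySem.List.pyGet?_natCast, List.getElem?_eq_getElem (show k + 1 < xs.length by omega)]
  | case4 k h =>
      have : (xs.drop k).length ≤ 1 := by simp; omega
      rcases hd : xs.drop k with _ | ⟨a, _ | ⟨b, t⟩⟩ <;> simp_all [pvGI]

theorem pvConsR_cons (x b : Int) (L : Nat) (r' : List (Int × Nat)) :
    pvConsR x ((b, L) :: r') = if x = b then (x, L + 1) :: r' else (x, 1) :: (b, L) :: r' := rfl

theorem pvRuns_cons (a : Int) (t : List Int) : pvRuns (a :: t) = pvConsR a (pvRuns t) := by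
  simp [pvRuns, pvConsR]

theorem pvRuns_head (a : Int) (t : List Int) : ∃ L r, pvRuns (a :: t) = (a, L) :: r := by
  rw [pvRuns_cons]
  rcases h : pvRuns t with _ | ⟨⟨b, L⟩, r⟩
  · exact ⟨1, [], rfl⟩
  · rw [pvConsR_cons]; by_cases hab : a = b <;> simp [hab]

theorem pvSnocR_concat (l : List (Int × Nat)) (q : Int) (Lq : Nat) (a : Int) :
    pvSnocR (l ++ [(q, Lq)]) a =
      if q = a then l ++ [(q, Lq + 1)] else l ++ [(q, Lq), (a, 1)] := by
  unfold pvSnocR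
  rw [List.getLast?_concat]
  split_ifs with h <;> simp_all

theorem pvCons_snoc_comm (x a : Int) (r : List (Int × Nat)) :
    pvConsR x (pvSnocR r a) = pvSnocR (pvConsR x r) a := by
  rcases r with _ | ⟨⟨b, L⟩, r'⟩
  · simp [pvConsR, pvSnocR]
  · rcases hr : r'.getLast? with _ | ⟨q, Lq⟩
    · have hr' : r' = [] := by simpa using hr
      subst hr'
      simp only [pvConsR, pvSnocR]
      split_ifs <;> simp_all [pvConsR, pvSnocR] <;> split_ifs <;> simp_all <;> omega
    · obtain ⟨r'', rfl⟩ := (List.getLast?_eq_some_iff.mp hr)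
      have key : pvSnocR ((b, L) :: (r'' ++ [(q, Lq)])) a =
          if q = a then (b, L) :: (r'' ++ [(q, Lq + 1)]) else (b, L) :: (r'' ++ [(q, Lq), (a, 1)]) := by
        show pvSnocR (((b, L) :: r'') ++ [(q, Lq)]) a = _
        rw [pvSnocR_concat]; split_ifs <;> rfl
      rw [key, pvConsR_cons]
      by_cases hqa : q = a <;> by_cases hxb : x = b
      · rw [if_pos hqa, if_pos hxb, pvConsR_cons, if_pos hxb]
        show _ = pvSnocR (((x, L + 1) :: r'') ++ [(q, Lq)]) a
        rw [pvSnocR_concat, if_pos hqa]; rfl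
      · rw [if_pos hqa, if_neg hxb, pvConsR_cons, if_neg hxb]
        show _ = pvSnocR (((x, 1) :: (b, L) :: r'') ++ [(q, Lq)]) a
        rw [pvSnocR_concat, if_pos hqa]; rfl
      · rw [if_neg hqa, if_pos hxb, pvConsR_cons, if_pos hxb]
        show _ = pvSnocR (((x, L + 1) :: r'') ++ [(q, Lq)]) a
        rw [pvSnocR_concat, if_neg hqa]; rfl
      · rw [if_neg hqa, if_neg hxb, pvConsR_cons, if_neg hxb]
        show _ = pvSnocR (((x, 1) :: (b, L) :: r'') ++ [(q, Lq)]) a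
        rw [pvSnocR_concat, if_neg hqa]; rfl

theorem pvRuns_snoc (xs : List Int) (a : Int) : pvRuns (xs ++ [a]) = pvSnocR (pvRuns xs) a := by
  induction xs with
  | nil => simp [pvRuns, pvSnocR]
  | cons x xs ih =>
      rw [List.cons_append, pvRuns_cons, ih, pvRuns_cons, pvCons_snoc_comm]

theorem pvSum_cons (x : Int × Nat) (r : List (Int × Nat)) :
    pvSum (x :: r) = x.2 / 2 + pvSum r := by simp [pvSum]

theorem pvG_eq_sum (p : List Int) : pvG p = pvSum (pvRuns p) := by
  fun_induction pvG p with
  | case1 => simp [pvRuns, pvSum]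
  | case2 a => simp [pvRuns, pvSum]
  | case3 a t ih =>
      rw [pvRuns_cons, pvRuns_cons]
      rcases hr : pvRuns t with _ | ⟨⟨c, L⟩, r⟩
      · have ht : t = [] := by
          cases t with
          | nil => rfl
          | cons x xs => obtain ⟨L, r, hx⟩ := pvRuns_head x xs; rw [hx] at hr; cases hr
        subst ht
        simp [pvConsR, pvSum, pvG]
      · by_cases hac : a = c
        · subst hac
          rw [pvConsR_cons, if_pos rfl, pvConsR_cons, if_pos rfl, pvSum_cons, ih, hr, pvSum_cons]
          omega
        · rw [pvConsR_cons, if_neg hac, pvConsR_cons, if_pos rfl, pvSum_cons, ih, hr, pvSum_cons]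
          simp
  | case4 a b t h ih =>
      obtain ⟨L, r, hb⟩ := pvRuns_head b t
      rw [pvRuns_cons, hb, pvConsR_cons, if_neg h, pvSum_cons, ih, hb]
      simp

theorem pvSum_append (l1 l2 : List (Int × Nat)) : pvSum (l1 ++ l2) = pvSum l1 + pvSum l2 := by
  simp [pvSum]

theorem pvSC'_pair (b : Int) (L : Nat) (q : Int) (Lq : Nat) :
    pvSC' [(b, L), (q, Lq)] = if b = q then (L + Lq) / 2 else L / 2 + Lq / 2 := by
  by_cases h : b = q <;> simp [pvSC', pvSum, h]

theorem pvSC'_concat2 (b : Int) (L : Nat) (l : List (Int × Nat)) (q : Int) (Lq : Nat) :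
    pvSC' ((b, L) :: (l ++ [(q, Lq)])) =
      if b = q then (L + Lq) / 2 + pvSum l else L / 2 + pvSum l + Lq / 2 := by
  unfold pvSC'
  have hlen : 1 < ((b, L) :: (l ++ [(q, Lq)])).length := by simp
  have hlast : (((b, L) :: (l ++ [(q, Lq)])).getLastD (0, 0)) = (q, Lq) := by
    rw [← List.cons_append, List.getLastD_concat]
  have hlast2 : ((l ++ [(q, Lq)]).getLastD (0, 0)) = (q, Lq) := List.getLastD_concat
  by_cases h : b = q
  · rw [if_pos ⟨hlen, by rw [hlast]; exact h⟩, if_pos h]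
    have hdl : (l ++ [(q, Lq)]).dropLast = l := List.dropLast_concat
    simp only [hlast2, hdl]
    rw [pvSum_cons]
  · rw [if_neg (by rw [hlast]; exact fun hc => h hc.2), if_neg h]
    rw [pvSum_cons, pvSum_append, pvSum_cons]
    simp [pvSum]
    omega

theorem pvSC'_comm (x : Int) (r : List (Int × Nat)) : pvSC' (pvConsR x r) = pvSC' (pvSnocR r x) := by
  rcases r with _ | ⟨⟨b, L⟩, r'⟩
  · simp [pvConsR, pvSnocR]
  · rcases hr : r'.getLast? with _ | ⟨q, Lq⟩
    · have hr' : r' = [] := by simpa using hr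
      subst hr'
      rw [pvConsR_cons]
      have hs : pvSnocR [(b, L)] x = if b = x then [(b, L + 1)] else [(b, L), (x, 1)] := by
        show pvSnocR ([] ++ [(b, L)]) x = _
        rw [pvSnocR_concat]; simp
      rw [hs]
      by_cases hxb : x = b
      · rw [if_pos hxb, if_pos hxb.symm, hxb]
      · rw [if_neg hxb, if_neg (fun hc => hxb hc.symm), pvSC'_pair, pvSC'_pair,
            if_neg hxb, if_neg (fun hc => hxb hc.symm)]
        omega
    · obtain ⟨r'', rfl⟩ := (List.getLast?_eq_some_iff.mp hr)
      have hsn : pvSnocR ((b, L) :: (r'' ++ [(q, Lq)])) x =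
          if q = x then (b, L) :: (r'' ++ [(q, Lq + 1)]) else (b, L) :: (r'' ++ [(q, Lq), (x, 1)]) := by
        show pvSnocR (((b, L) :: r'') ++ [(q, Lq)]) x = _
        rw [pvSnocR_concat]; split_ifs <;> rfl
      rw [hsn, pvConsR_cons]
      have e2 : pvSC' ((x, 1) :: ((b, L) :: (r'' ++ [(q, Lq)]))) =
          if x = q then (1 + Lq) / 2 + pvSum ((b, L) :: r'') else 1 / 2 + pvSum ((b, L) :: r'') + Lq / 2 :=
        pvSC'_concat2 x 1 ((b, L) :: r'') q Lq
      have hass : r'' ++ [(q, Lq), (x, 1)] = (r'' ++ [(q, Lq)]) ++ [(x, 1)] := by simp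
      by_cases hxb : x = b <;> by_cases hqx : q = x
      · rw [if_pos hxb, if_pos hqx, pvSC'_concat2, pvSC'_concat2,
            if_pos hqx.symm, if_pos (hxb.symm.trans hqx.symm)]
        omega
      · rw [if_pos hxb, if_neg hqx, pvSC'_concat2, if_neg (fun hc => hqx hc.symm),
            hass, pvSC'_concat2, if_pos hxb.symm, pvSum_append, pvSum_cons]
        clear e2; simp [pvSum]; omega
      · rw [if_neg hxb, if_pos hqx, e2, if_pos hqx.symm, pvSC'_concat2,
            if_neg (fun hc => hxb ((hc.trans hqx).symm)), pvSum_cons]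
        simp [pvSum]; omega
      · rw [if_neg hxb, if_neg hqx, e2, if_neg (fun hc => hqx hc.symm),
            hass, pvSC'_concat2, if_neg (fun hc => hxb hc.symm), pvSum_append, pvSum_cons, pvSum_cons]
        simp [pvSum]; omega

theorem pvSC_rotate_one (a : Int) (t : List Int) : pvSC (t ++ [a]) = pvSC (a :: t) := by
  unfold pvSC
  rw [pvRuns_snoc, pvRuns_cons, pvSC'_comm]

theorem pvSC_rotate (p : List Int) (i : Nat) : pvSC (p.rotate i) = pvSC p := by
  induction i generalizing p with
  | zero => simp
  | succ n ih =>
      cases p with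
      | nil => simp
      | cons a t => rw [List.rotate_cons_succ, ih, pvSC_rotate_one]

theorem pvSum_le_SC' (r : List (Int × Nat)) : pvSum r ≤ pvSC' r := by
  unfold pvSC'
  split_ifs with h
  · rcases r with _ | ⟨⟨b, L⟩, rest⟩
    · simp [pvSum]
    · have hne : rest ≠ [] := by intro hc; subst hc; simp at h
      obtain ⟨l, pr, rfl⟩ : ∃ l pr, rest = l ++ [pr] :=
        ⟨rest.dropLast, rest.getLast hne, (List.dropLast_append_getLast hne).symm⟩
      rcases pr with ⟨q, Lq⟩
      simp only [List.getLastD_concat, List.dropLast_concat]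
      rw [pvSum_cons, pvSum_append, pvSum_cons, pvSum_cons]
      simp [pvSum]
      omega
  · exact le_refl _

theorem pvSC'_no_merge (r : List (Int × Nat))
    (h : ¬ (1 < r.length ∧ (r.headD (0, 0)).1 = (r.getLastD (0, 0)).1)) : pvSC' r = pvSum r := by
  unfold pvSC'
  rw [if_neg h]

theorem pvSnocR_last (r : List (Int × Nat)) (a : Int) : ((pvSnocR r a).getLastD (0, 0)).1 = a := by
  unfold pvSnocR
  rcases h : r.getLast? with _ | ⟨q, L⟩ <;> simp
  split_ifs with hq
  · simp [List.getLastD_concat, hq]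
  · simp [List.getLastD_concat]

theorem pvRuns_last (t : List Int) (a : Int) : ((pvRuns (t ++ [a])).getLastD (0, 0)).1 = a := by
  rw [pvRuns_snoc]; exact pvSnocR_last _ _

theorem pvConst_runs (p : List Int) (hp : p ≠ [])
    (h : ∀ j, (hj : j + 1 < p.length) → p[j] = p[j + 1]) :
    pvRuns p = [(p.head hp, p.length)] := by
  induction p with
  | nil => simp at hp
  | cons a t ih =>
      cases t with
      | nil => simp [pvRuns]
      | cons b t' =>
          have hab : a = b := h 0 (by simp)
          have ht : pvRuns (b :: t') = [(b, t'.length + 1)] := by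
            rw [ih (by simp) ?_]
            · simp
            · intro j hj
              have := h (j + 1) (by simp at hj ⊢; omega)
              simpa using this
          rw [pvRuns_cons, ht, pvConsR_cons, if_pos hab]
          simp [hab]

theorem pvExists_cut (p : List Int) (hp : p ≠ []) :
    ∃ i < p.length, pvSum (pvRuns (p.rotate i)) = pvSC p := by
  by_cases hconst : ∀ j, (hj : j + 1 < p.length) → p[j] = p[j + 1]
  · refine ⟨0, by cases p with | nil => simp at hp | cons a t => simp, ?_⟩
    rw [List.rotate_zero]
    unfold pvSC
    rw [pvConst_runs p hp hconst, pvSC'_no_merge]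
    simp
  · push_neg at hconst
    obtain ⟨j, hj, hne⟩ := hconst
    refine ⟨j + 1, by omega, ?_⟩
    have hrot : p.rotate (j + 1) = p.drop (j + 1) ++ p.take (j + 1) :=
      List.rotate_eq_drop_append_take (by omega)
    -- head of the rotated list is p[j+1]
    have hdrop : p.drop (j + 1) = p[j + 1] :: p.drop (j + 2) := List.drop_eq_getElem_cons hj
    -- the rotated list ends with p[j]
    have htake : p.take (j + 1) = p.take j ++ [p[j]] := by
      rw [List.take_succ, List.getElem?_eq_getElem (by omega)]
      simp
    obtain ⟨L, r, hruns⟩ :=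
      pvRuns_head (p[j + 1]) (p.drop (j + 2) ++ p.take (j + 1))
    have hq : p.rotate (j + 1) = p[j + 1] :: (p.drop (j + 2) ++ p.take (j + 1)) := by
      rw [hrot, hdrop, List.cons_append]
    have hlast : ((pvRuns (p.rotate (j + 1))).getLastD (0, 0)).1 = p[j] := by
      have : p.rotate (j + 1) = (p[j + 1] :: (p.drop (j + 2) ++ p.take j)) ++ [p[j]] := by
        rw [hq, htake]; simp
      rw [this]
      exact pvRuns_last _ _
    have hhead : ((pvRuns (p.rotate (j + 1))).headD (0, 0)).1 = p[j + 1] := by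
      rw [hq, hruns]; simp
    have hnm : ¬ (1 < (pvRuns (p.rotate (j + 1))).length ∧
        ((pvRuns (p.rotate (j + 1))).headD (0, 0)).1 =
          ((pvRuns (p.rotate (j + 1))).getLastD (0, 0)).1) := by
      rintro ⟨-, he⟩
      rw [hhead, hlast] at he
      exact hne he.symm
    have h1 : pvSC (p.rotate (j + 1)) = pvSC p := pvSC_rotate p (j + 1)
    rw [← h1]
    unfold pvSC
    rw [pvSC'_no_merge _ hnm]


-- bridge from B's Int-valued run lists to the Nat-valued abstract ones
def pvLift (r : List (Int × Nat)) : List (Int × Int) := r.map (fun x => (x.1, (x.2 : Int)))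

theorem pvStepB_lift (r : List (Int × Nat)) (a : Int) :
    pvStepB (pvLift r) a = pvLift (pvSnocR r (pvPar a)) := by
  rcases hr : r.getLast? with _ | ⟨q, L⟩
  · have hr' : r = [] := by simpa using hr
    subst hr'
    simp [pvStepB, pvSnocR, pvLift, pvPar]
  · obtain ⟨l, rfl⟩ := List.getLast?_eq_some_iff.mp hr
    rw [pvSnocR_concat]
    unfold pvStepB pvLift pvPar
    simp only [List.map_append, List.map_cons, List.map_nil, List.getLast?_concat]
    split_ifs <;> simp

theorem pvFoldl_runs (xs : List Int) (q : List Int) :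
    xs.foldl pvStepB (pvLift (pvRuns q)) = pvLift (pvRuns (q ++ xs.map pvPar)) := by
  induction xs generalizing q with
  | nil => simp
  | cons x xs ih =>
      rw [List.foldl_cons, pvStepB_lift, ← pvRuns_snoc, ih]
      congr 1
      simp

theorem pvLift_getLastD (r : List (Int × Nat)) (d : Int × Nat) :
    (pvLift r).getLastD (d.1, (d.2 : Int)) = ((r.getLastD d).1, ((r.getLastD d).2 : Int)) := by
  induction r generalizing d with
  | nil => simp [pvLift]
  | cons a l ih =>
      simp only [pvLift, List.map_cons, List.getLastD_cons]
      exact ih a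

theorem pvLift_cons (a : Int × Nat) (l : List (Int × Nat)) :
    pvLift (a :: l) = (a.1, (a.2 : Int)) :: pvLift l := rfl

theorem pvLift_length (r : List (Int × Nat)) : (pvLift r).length = r.length := by simp [pvLift]

theorem pvLift_headD1 (r : List (Int × Nat)) :
    ((pvLift r).headD (0, 0)).1 = (r.headD (0, 0)).1 := by
  cases r <;> simp [pvLift]

theorem pvLift_lastD1 (r : List (Int × Nat)) :
    ((pvLift r).getLastD (0, 0)).1 = (r.getLastD (0, 0)).1 := by
  have h := pvLift_getLastD r (0, 0)
  simp only [Nat.cast_zero] at h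
  rw [h]

theorem pvLift_lastD2 (r : List (Int × Nat)) :
    ((pvLift r).getLastD (0, 0)).2 = ((r.getLastD (0, 0)).2 : Int) := by
  have h := pvLift_getLastD r (0, 0)
  simp only [Nat.cast_zero] at h
  rw [h]

theorem pvFold_sum (r : List (Int × Nat)) (c : Int) :
    (pvLift r).foldl (fun s x => s + PySem.Int.floordiv x.2 2) c = c + (pvSum r : Int) := by
  induction r generalizing c with
  | nil => simp [pvLift, pvSum]
  | cons a l ih =>
      rw [pvLift_cons, List.foldl_cons, ih, pvSum_cons,
          show PySem.Int.floordiv ((a.2 : Nat) : Int) 2 = ((a.2 / 2 : Nat) : Int) from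
            PySem.Int.floordiv_natCast a.2 2]
      push_cast
      ring

theorem solution_alt_eq (A : List Int) : solution_alt A = (pvSC (A.map pvPar) : Int) := by
  unfold solution_alt pvMergeB
  have hruns : pvRunsB A = pvLift (pvRuns (A.map pvPar)) := by
    unfold pvRunsB
    have h0 := pvFoldl_runs A []
    simpa [pvLift, pvRuns] using h0
  rw [hruns]
  unfold pvSC pvSC'
  rcases hr : pvRuns (A.map pvPar) with _ | ⟨⟨b, L⟩, rest⟩
  · simp [pvLift, pvSum]
  · by_cases hc : 1 < ((b, L) :: rest).length ∧
        ((((b, L) :: rest) : List (Int × Nat)).headD (0, 0)).1 = (((b, L) :: rest).getLastD (0, 0)).1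
    · rw [if_pos (by rw [pvLift_length, pvLift_headD1, pvLift_lastD1]; exact hc), if_pos hc]
      rw [pvLift_cons]
      show List.foldl (fun s r => s + PySem.Int.floordiv r.2 2) 0
          ((((b, L) : Int × Nat).1, ((L : Int)) + ((pvLift rest).getLastD (0, 0)).2) ::
            (pvLift rest).dropLast) = _
      have hl : ((((b, L) : Int × Nat).1, ((L : Int)) + ((pvLift rest).getLastD (0, 0)).2) ::
          (pvLift rest).dropLast)
          = pvLift ((b, L + (rest.getLastD (0, 0)).2) :: rest.dropLast) := by
        rw [pvLift_cons]
        have h2 := pvLift_lastD2 rest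
        have hdl : (pvLift rest).dropLast = pvLift rest.dropLast := by
          simp [pvLift, List.map_dropLast]
        rw [h2, hdl]
        push_cast
        rfl
      rw [hl, pvFold_sum]
      ring
    · rw [if_neg (by rw [pvLift_length, pvLift_headD1, pvLift_lastD1]; exact hc), if_neg hc,
          pvFold_sum]
      ring

theorem solution_counts (A : List Int) :
    (PySem.List.pyRange 0 (A.length : Int) 1).map (fun i =>
      pvGreedyA (PySem.List.slice A (some i) none ++ PySem.List.slice A (some 0) (some i)) 0)
      = (List.range A.length).map (fun k => ((pvG ((A.map pvPar).rotate k) : Nat) : Int)) := by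
  rw [PySem.List.pyRange_one]
  simp only [sub_zero, Int.toNat_natCast]
  rw [List.map_map]
  apply List.map_congr_left
  intro k hk
  have hk' : k < A.length := List.mem_range.mp hk
  simp only [Function.comp_apply, zero_add]
  rw [PySem.List.slice_from_natCast, PySem.List.slice_zero_start, PySem.List.slice_to_natCast]
  rw [pvGreedyA_eq, List.drop_zero, pvGI_eq_pvG]
  congr 2
  rw [List.map_append, List.rotate_eq_drop_append_take (by simpa using hk'.le)]
  simp [List.map_drop, List.map_take]

theorem solution_eq (A : List Int) (h : A ≠ []) : solution A = (pvSC (A.map pvPar) : Int) := by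
  unfold solution
  show (PySem.List.max? ((PySem.List.pyRange 0 (A.length : Int) 1).map (fun i =>
      pvGreedyA (PySem.List.slice A (some i) none ++ PySem.List.slice A (some 0) (some i)) 0))
      (fun x => x)).getD 0 = _
  rw [solution_counts]
  have hPne : (A.map pvPar) ≠ [] := by simpa using h
  have hlenP : (A.map pvPar).length = A.length := by simp
  have hub : ∀ m ∈ (List.range A.length).map
      (fun k => ((pvG ((A.map pvPar).rotate k) : Nat) : Int)), m ≤ ((pvSC (A.map pvPar) : Nat) : Int) := by
    intro m hm
    obtain ⟨k, hk, rfl⟩ := List.mem_map.mp hm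
    have h1 := pvG_eq_sum ((A.map pvPar).rotate k)
    have h2 := pvSum_le_SC' (pvRuns ((A.map pvPar).rotate k))
    have h3 : pvSC ((A.map pvPar).rotate k) = pvSC (A.map pvPar) := pvSC_rotate _ k
    unfold pvSC at h3
    exact_mod_cast (show pvG ((A.map pvPar).rotate k) ≤ pvSC (A.map pvPar) by
      unfold pvSC; omega)
  obtain ⟨i, hi, hival⟩ := pvExists_cut (A.map pvPar) hPne
  have hin : ((pvSC (A.map pvPar) : Nat) : Int) ∈ (List.range A.length).map
      (fun k => ((pvG ((A.map pvPar).rotate k) : Nat) : Int)) := by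
    refine List.mem_map.mpr ⟨i, List.mem_range.mpr (by omega), ?_⟩
    rw [pvG_eq_sum, hival]
  rcases hmax : PySem.List.max? ((List.range A.length).map
      (fun k => ((pvG ((A.map pvPar).rotate k) : Nat) : Int))) (fun x => x) with _ | m
  · rw [PySem.List.max?_eq_none_iff] at hmax
    rw [hmax] at hin
    simp at hin
  · have hle := PySem.List.max?_isMax hmax _ hin
    have hge := hub m (PySem.List.max?_mem hmax)
    have hm : m = ((pvSC (A.map pvPar) : Nat) : Int) := le_antisymm hge hle
    rw [Option.getD_some, hm]

-- ===== VERDICT (by name: the statement is the Claim_ definition above) =====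
theorem solution_spec : Claim_equal_solution := by
  intro A hdom hpre
  unfold Spec_solution
  rw [solution_eq A hpre, solution_alt_eq]
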